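-- pv_equiv track=rewrite | github.com/TN-Junior/inovation_challenge | ChallengeOne/Innovation_Level.py | calcular_nivel_de_inovacao
-- ===== SOURCE A (Python) =====
-- def calcular_nivel_de_inovacao(historico: list[int], impulsionadores: set[int], barreiras: set[int]) -> int:
--     nivel_inovacao = 0
--     for evento in historico:
--         if evento in impulsionadores:
--             nivel_inovacao += 1
--         elif evento in barreiras:
--             nivel_inovacao -= 1
--     return nivel_inovacao
-- ===== SOURCE B (Python) =====
-- def calcular_nivel_de_inovacao(historico: list[int], impulsionadores: set[int], barreiras: set[int]) -> int:
--     # Frequency table in one pass, then score the two membership sets by multiplicity.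
--     cnt = {}
--     for e in historico:
--         cnt[e] = cnt.get(e, 0) + 1
--     total = 0
--     for e in impulsionadores:
--         total += cnt.get(e, 0)
--     for e in barreiras:
--         if e not in impulsionadores:
--             total -= cnt.get(e, 0)
--     return total
-- ===== Notes on version B (the rewrite author's own statement) =====
-- stated objective: alternative
-- what changed: Replaces the per-event membership scan with a frequency table built once over the history, then sums multiplicities over the impulse set and subtracts them over the barrier-only events (barriers not in impulsionadores, preserving A's elif priority).
import Mathlib
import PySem

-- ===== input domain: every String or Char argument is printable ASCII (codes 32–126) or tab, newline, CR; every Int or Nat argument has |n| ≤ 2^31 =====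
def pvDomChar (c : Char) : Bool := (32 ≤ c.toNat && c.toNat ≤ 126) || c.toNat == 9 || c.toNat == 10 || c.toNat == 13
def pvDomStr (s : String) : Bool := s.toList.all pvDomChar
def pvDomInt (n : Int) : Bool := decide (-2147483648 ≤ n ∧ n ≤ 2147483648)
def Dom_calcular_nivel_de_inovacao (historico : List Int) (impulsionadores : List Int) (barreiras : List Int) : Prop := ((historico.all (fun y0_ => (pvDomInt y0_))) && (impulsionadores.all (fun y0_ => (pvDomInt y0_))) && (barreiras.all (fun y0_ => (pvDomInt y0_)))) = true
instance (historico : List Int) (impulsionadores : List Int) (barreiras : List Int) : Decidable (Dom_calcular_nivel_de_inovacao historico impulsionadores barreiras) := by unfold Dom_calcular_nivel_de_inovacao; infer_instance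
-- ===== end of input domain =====

-- B builds a frequency table of the history once and scores the two membership sets by
-- multiplicity (barrier-only events subtracted), instead of scanning the history with per-event tests.


-- ===== PORT A =====
def calcular_nivel_de_inovacao (historico : List Int) (impulsionadores : List Int) (barreiras : List Int) : Int :=
  historico.foldl (fun nivel_inovacao evento =>
    if impulsionadores.contains evento then nivel_inovacao + 1
    else if barreiras.contains evento then nivel_inovacao - 1
    else nivel_inovacao) 0

-- ===== PORT B =====
def calcular_nivel_de_inovacao_alt (historico : List Int) (impulsionadores : List Int) (barreiras : List Int) : Int :=
  let cnt := historico.foldl (fun d e => d.insert e (d.getD e 0 + 1)) PySem.Dict.empty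
  let total := impulsionadores.foldl (fun t e => t + cnt.getD e 0) 0
  barreiras.foldl (fun t e => if impulsionadores.contains e then t else t - cnt.getD e 0) total

-- ===== PRECONDITION & SPEC =====
-- Pre_ only encodes the set[int] type convention: impulsionadores and barreiras are Python
-- sets, so their List Int representations hold distinct elements.
def Pre_calcular_nivel_de_inovacao (historico : List Int) (impulsionadores : List Int) (barreiras : List Int) : Prop :=
  impulsionadores.Nodup ∧ barreiras.Nodup
instance (historico : List Int) (impulsionadores : List Int) (barreiras : List Int) : Decidable (Pre_calcular_nivel_de_inovacao historico impulsionadores barreiras) := by unfold Pre_calcular_nivel_de_inovacao; infer_instance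
def pvWitness_calcular_nivel_de_inovacao : List Int × List Int × List Int := ([1, 2, 2, 3], [1, 3], [2, 4])
def Spec_calcular_nivel_de_inovacao (historico : List Int) (impulsionadores : List Int) (barreiras : List Int) (out : Int) : Prop := out = calcular_nivel_de_inovacao_alt historico impulsionadores barreiras
instance (historico : List Int) (impulsionadores : List Int) (barreiras : List Int) (out : Int) : Decidable (Spec_calcular_nivel_de_inovacao historico impulsionadores barreiras out) := by unfold Spec_calcular_nivel_de_inovacao; infer_instance

-- ===== CLAIM (what is proved, stated in full; the proofs are below) =====
def Claim_equal_calcular_nivel_de_inovacao : Prop := ∀ (historico : List Int) (impulsionadores : List Int) (barreiras : List Int), Dom_calcular_nivel_de_inovacao historico impulsionadores barreiras → Pre_calcular_nivel_de_inovacao historico impulsionadores barreiras → Spec_calcular_nivel_de_inovacao historico impulsionadores barreiras (calcular_nivel_de_inovacao historico impulsionadores barreiras)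

-- ===== LEMMAS AND PROOFS =====

-- sum of multiplicities of the elements of l in t
def pvC (t l : List Int) : Int := (l.map (fun e => ((t.count e : Int)))).sum

theorem pvC_nil (l : List Int) : pvC [] l = 0 := by
  induction l with
  | nil => rfl
  | cons a l ih => simp [pvC]

theorem pvC_cons (h : Int) (t l : List Int) (hl : l.Nodup) :
    pvC (h :: t) l = pvC t l + (if h ∈ l then 1 else 0) := by
  induction l with
  | nil => simp [pvC]
  | cons a l ih =>
    rcases List.nodup_cons.mp hl with ⟨ha, hl'⟩
    have ih' := ih hl'
    simp only [pvC, List.map_cons, List.sum_cons] at ih' ⊢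
    rw [List.count_cons]
    by_cases hah : h = a
    · subst hah
      rw [ih', if_neg ha, if_pos (List.mem_cons_self ..)]
      have hbeq : (h == h) = true := by simp
      rw [if_pos hbeq]
      push_cast
      ring
    · have hbeq : (h == a) = false := by simp [hah]
      simp only [hbeq, Bool.false_eq_true, if_false, Nat.add_zero]
      rw [ih']
      have hm : (h ∈ a :: l) ↔ (h ∈ l) := by simp [hah]
      rw [if_congr hm rfl rfl]
      ring

theorem pv_key (imp bar : List Int) (hi : imp.Nodup) (hb : bar.Nodup) (t : List Int) :
    (t.map (fun e => if imp.contains e then (1 : Int) else if bar.contains e then -1 else 0)).sum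
      = pvC t imp - pvC t (bar.filter (fun e => !imp.contains e)) := by
  induction t with
  | nil => simp [pvC_nil]
  | cons h t ih =>
    have hbf : (bar.filter (fun e => !imp.contains e)).Nodup := hb.filter _
    simp only [List.map_cons, List.sum_cons]
    rw [ih, pvC_cons h t imp hi, pvC_cons h t _ hbf]
    have hmf : h ∈ bar.filter (fun e => !imp.contains e) ↔ h ∈ bar ∧ ¬ (h ∈ imp) := by
      simp [List.mem_filter]
    simp only [List.contains_eq_mem]
    split_ifs with h1 h2 h3 h4 h5 <;> simp_all <;> omega

theorem pvA_eq (imp bar : List Int) (t : List Int) (acc : Int) :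
    t.foldl (fun nivel evento =>
      if imp.contains evento then nivel + 1
      else if bar.contains evento then nivel - 1 else nivel) acc
    = acc + (t.map (fun e => if imp.contains e then (1 : Int) else if bar.contains e then -1 else 0)).sum := by
  induction t generalizing acc with
  | nil => simp
  | cons h t ih =>
    simp only [List.foldl_cons, List.map_cons, List.sum_cons]
    rw [ih]
    split_ifs <;> ring

theorem pvB_eq (imp bar : List Int) (hist : List Int) :
    calcular_nivel_de_inovacao_alt hist imp bar
      = pvC hist imp - pvC hist (bar.filter (fun e => !imp.contains e)) := by
  unfold calcular_nivel_de_inovacao_alt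
  simp only
  rw [PySem.Dict.foldl_insert_getD_add_one_eq_counter]
  have h1 : ∀ (l : List Int) (a : Int),
      l.foldl (fun t e => t + (PySem.Dict.counter hist).getD e 0) a = a + pvC hist l := by
    intro l a
    induction l generalizing a with
    | nil => simp [pvC]
    | cons x l ih =>
      simp only [List.foldl_cons]
      rw [ih]
      simp [pvC, PySem.Dict.getD_counter]
      ring
  have h2 : ∀ (l : List Int) (a : Int),
      l.foldl (fun t e => if imp.contains e then t else t - (PySem.Dict.counter hist).getD e 0) a
        = a - pvC hist (l.filter (fun e => !imp.contains e)) := by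
    intro l a
    induction l generalizing a with
    | nil => simp [pvC]
    | cons x l ih =>
      simp only [List.foldl_cons, List.contains_eq_mem] at *
      by_cases hx : x ∈ imp
      · rw [if_pos (by simp [hx]), ih]
        simp [hx]
      · rw [if_neg (by simp [hx]), ih]
        simp only [List.filter_cons, hx, decide_false, Bool.not_false, if_pos]
        simp [pvC, PySem.Dict.getD_counter]
        ring
  rw [h1, h2]
  ring

-- ===== VERDICT (by name: the statement is the Claim_ definition above) =====
theorem calcular_nivel_de_inovacao_spec : Claim_equal_calcular_nivel_de_inovacao := by
  intro hist imp bar _ hpre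
  unfold Spec_calcular_nivel_de_inovacao calcular_nivel_de_inovacao
  rw [pvB_eq, pvA_eq, ← pv_key imp bar hpre.1 hpre.2, zero_add]
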